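-- pv_equiv track=rewrite | github.com/ffvv0123/CodingTest | 백준/Bronze/20651. Daisy Chains/Daisy Chains.py | count_average_flower_photos
-- ===== SOURCE A (Python) =====
-- def count_average_flower_photos(N, petals):
--     count = 0
--
--     for i in range(N):
--         total_petals = 0
--         for j in range(i, N):
--             total_petals += petals[j]
--             num_flowers = j - i + 1
--             if total_petals % num_flowers == 0:
--                 average_petals = total_petals // num_flowers
--                 if average_petals in petals[i:j+1]:
--                     count += 1
--
--     return count
-- ===== SOURCE B (Python) =====
-- def count_average_flower_photos(N, petals):
--     # Different algorithm: prefix sums for window totals + for each window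
--     # length L, slide a multiset (count dict) of the window across the array.
--     prefix = [0]
--     for x in petals[:N]:
--         prefix.append(prefix[-1] + x)
--     count = 0
--     for L in range(1, N + 1):
--         cnt = {}
--         for x in petals[:L]:
--             cnt[x] = cnt.get(x, 0) + 1
--         for i in range(N - L + 1):
--             total = prefix[i + L] - prefix[i]
--             if total % L == 0 and cnt.get(total // L, 0) > 0:
--                 count += 1
--             if i + L < N:
--                 cnt[petals[i]] -= 1
--                 nxt = petals[i + L]
--                 cnt[nxt] = cnt.get(nxt, 0) + 1
--     return count
-- ===== Notes on version B (the rewrite author's own statement) =====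
-- stated objective: alternative
-- what changed: B uses a different algorithm: it precomputes prefix sums for all window totals and, iterating by window length L, slides a count dict (multiset) of the window's elements across the array, instead of A's per-(i,j) running total plus slice re-scan; measured not faster (A's slice scan only runs when the divisibility test fires, so A is cheap in practice).
import Mathlib
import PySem

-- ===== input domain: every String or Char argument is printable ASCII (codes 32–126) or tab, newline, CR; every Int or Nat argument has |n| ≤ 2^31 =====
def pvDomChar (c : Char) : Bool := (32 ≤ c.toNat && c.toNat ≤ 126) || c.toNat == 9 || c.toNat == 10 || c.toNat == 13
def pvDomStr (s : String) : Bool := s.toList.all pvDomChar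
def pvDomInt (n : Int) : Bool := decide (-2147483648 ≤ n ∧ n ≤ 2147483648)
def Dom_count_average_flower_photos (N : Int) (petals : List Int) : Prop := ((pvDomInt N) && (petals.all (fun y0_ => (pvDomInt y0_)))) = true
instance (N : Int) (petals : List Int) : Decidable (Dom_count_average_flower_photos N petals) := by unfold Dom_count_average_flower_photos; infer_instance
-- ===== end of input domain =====

-- B is a different algorithm (objective: alternative): prefix sums give each window's
-- total, and for each window length the window's multiset of elements is slid across
-- the array as a count dict, replacing A's per-(i,j) running total and slice re-scan.

-- ===== PORT A =====
-- loop body of A's inner 'for j in range(i, N)': state (count, total_petals)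
def pvStepA (petals : List Int) (i : Int) (st : Int × Int) (j : Int) : Int × Int :=
  let total_petals := st.2 + PySem.List.pyGetD petals j 0
  let num_flowers := j - i + 1
  let count :=
    if PySem.Int.mod total_petals num_flowers = 0 then
      if PySem.Int.floordiv total_petals num_flowers ∈
          PySem.List.slice petals (some i) (some (j + 1)) then st.1 + 1 else st.1
    else st.1
  (count, total_petals)

def count_average_flower_photos (N : Int) (petals : List Int) : Int :=
  (PySem.List.pyRange 0 N 1).foldl
    (fun count i => ((PySem.List.pyRange i N 1).foldl (pvStepA petals i) (count, 0)).1) 0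

-- ===== PORT B =====
-- loop body of B's inner 'for i in range(N - L + 1)': state (count, cnt).
-- 'cnt[petals[i]] -= 1' is ported as insert (getD - 1): under Pre_ the key is always
-- present (petals[i] is in the current window), so this is exact there.
def pvStepB (N : Int) (petals : List Int) (pfx : List Int) (L : Int)
    (st : Int × PySem.Dict Int Int) (i : Int) : Int × PySem.Dict Int Int :=
  let total := PySem.List.pyGetD pfx (i + L) 0 - PySem.List.pyGetD pfx i 0
  let count :=
    if PySem.Int.mod total L = 0 ∧ 0 < st.2.getD (PySem.Int.floordiv total L) 0 then
      st.1 + 1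
    else st.1
  let cnt :=
    if i + L < N then
      let d1 := st.2.insert (PySem.List.pyGetD petals i 0)
        (st.2.getD (PySem.List.pyGetD petals i 0) 0 - 1)
      let nxt := PySem.List.pyGetD petals (i + L) 0
      d1.insert nxt (d1.getD nxt 0 + 1)
    else st.2
  (count, cnt)

def count_average_flower_photos_alt (N : Int) (petals : List Int) : Int :=
  let pfx := (PySem.List.slice petals none (some N)).foldl
    (fun acc x => acc ++ [PySem.List.pyGetD acc (-1) 0 + x]) [0]
  (PySem.List.pyRange 1 (N + 1) 1).foldl
    (fun count L =>
      let cnt := (PySem.List.slice petals none (some L)).foldl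
        (fun d x => d.insert x (d.getD x 0 + 1)) PySem.Dict.empty
      ((PySem.List.pyRange 0 (N - L + 1) 1).foldl (pvStepB N petals pfx L) (count, cnt)).1)
    0

-- ===== PRECONDITION & SPEC =====
-- A indexes petals[j] for every j < N, so N > len(petals) raises IndexError; Pre_ excludes exactly that.
def Pre_count_average_flower_photos (N : Int) (petals : List Int) : Prop :=
  N ≤ (petals.length : Int)
instance (N : Int) (petals : List Int) : Decidable (Pre_count_average_flower_photos N petals) := by
  unfold Pre_count_average_flower_photos; infer_instance

def pvWitness_count_average_flower_photos : Int × List Int := (3, [2, 1, 3])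

def Spec_count_average_flower_photos (N : Int) (petals : List Int) (out : Int) : Prop :=
  out = count_average_flower_photos_alt N petals
instance (N : Int) (petals : List Int) (out : Int) :
    Decidable (Spec_count_average_flower_photos N petals out) := by
  unfold Spec_count_average_flower_photos; infer_instance

-- ===== CLAIM (what is proved, stated in full; the proofs are below) =====
def Claim_equal_count_average_flower_photos : Prop :=
  ∀ (N : Int) (petals : List Int), Dom_count_average_flower_photos N petals →
    Pre_count_average_flower_photos N petals →
    Spec_count_average_flower_photos N petals (count_average_flower_photos N petals)

-- ===== LEMMAS AND PROOFS =====

-- the window petals[i:i+L] both programs reason about, and the per-window test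
def pvWin (petals : List Int) (i L : Nat) : List Int := (petals.drop i).take L

def pvGood (petals : List Int) (i L : Nat) : Bool :=
  decide (PySem.Int.mod (pvWin petals i L).sum (L : Int) = 0 ∧
    PySem.Int.floordiv (pvWin petals i L).sum (L : Int) ∈ pvWin petals i L)

-- the common double-sum both programs compute (A sums it i-major, B L-major)
def pvF (petals : List Int) (n i L : Nat) : Int :=
  if 1 ≤ L ∧ i + L ≤ n then (if pvGood petals i L then 1 else 0) else 0

-- window extended by one element on the right
lemma pvWin_succ (petals : List Int) (i k : Nat) (h : i + k < petals.length) :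
    pvWin petals i (k + 1) = pvWin petals i k ++ [petals[i + k]'h] := by
  unfold pvWin
  rw [List.take_add_one]
  have hlt : k < (petals.drop i).length := by simp [List.length_drop]; omega
  rw [List.getElem?_eq_getElem hlt]
  simp [List.getElem_drop]

-- window slid one step to the right: drop the head, append the next element
lemma pvWin_shift (petals : List Int) (a L : Nat) (hL : 1 ≤ L) (h : a + L < petals.length) :
    pvWin petals a L = petals[a]'(by omega) :: pvWin petals (a + 1) (L - 1) ∧
    pvWin petals (a + 1) L = pvWin petals (a + 1) (L - 1) ++ [petals[a + L]'h] := by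
  obtain ⟨L', rfl⟩ : ∃ L', L = L' + 1 := ⟨L - 1, by omega⟩
  simp only [Nat.add_sub_cancel]
  constructor
  · unfold pvWin
    rw [List.drop_eq_getElem_cons (show a < petals.length by omega), List.take_succ_cons]
  · have h2 : a + 1 + L' < petals.length := by omega
    have hs := pvWin_succ petals (a + 1) L' h2
    have hg : petals[a + 1 + L']'h2 = petals[a + L' + 1]'h := by congr 1; omega
    rw [hg] at hs
    exact hs

-- sum over a window from pfx sums
lemma pvWin_sum (petals : List Int) (a L : Nat) :
    (petals.take (a + L)).sum - (petals.take a).sum = (pvWin petals a L).sum := by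
  rw [List.take_add, List.sum_append]; unfold pvWin; ring

-- ===== A-side characterisation =====

-- reindex A's inner sum over right endpoints j as a sum over window lengths L
lemma pvReindexA (petals : List Int) (n i : Nat) :
    (∑ j ∈ Finset.Ico i n, if pvGood petals i (j - i + 1) then (1 : Int) else 0) =
      ∑ L ∈ Finset.range (n + 1), pvF petals n i L := by
  have hJ : (∑ j ∈ Finset.Ico i n, if pvGood petals i (j - i + 1) then (1 : Int) else 0) =
      ∑ j ∈ (Finset.Ico i n).filter (fun j => pvGood petals i (j - i + 1) = true), (1 : Int) := by
    rw [Finset.sum_filter]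
  have hL : (∑ L ∈ Finset.range (n + 1), pvF petals n i L) =
      ∑ L ∈ (Finset.range (n + 1)).filter
        (fun L => (1 ≤ L ∧ i + L ≤ n) ∧ pvGood petals i L = true), (1 : Int) := by
    rw [Finset.sum_filter]
    apply Finset.sum_congr rfl
    intro L _
    unfold pvF
    by_cases h1 : 1 ≤ L ∧ i + L ≤ n <;> by_cases h2 : pvGood petals i L <;> simp [h1, h2]
  rw [hJ, hL]
  apply Finset.sum_nbij' (fun j => j - i + 1) (fun L => i + L - 1)
  · intro a ha
    simp only [Finset.mem_filter, Finset.mem_Ico, Finset.mem_range] at ha ⊢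
    exact ⟨by omega, ⟨by omega, by omega⟩, ha.2⟩
  · intro L hLm
    simp only [Finset.mem_filter, Finset.mem_Ico, Finset.mem_range] at hLm ⊢
    refine ⟨⟨by omega, by omega⟩, ?_⟩
    rw [show i + L - 1 - i + 1 = L from by omega]
    exact hLm.2.2
  · intro a ha
    simp only [Finset.mem_filter, Finset.mem_Ico] at ha
    omega
  · intro L hLm
    simp only [Finset.mem_filter, Finset.mem_range] at hLm
    omega
  · intro a _
    rfl

lemma pvA_inner (petals : List Int) (n : Nat) (hn : (n : Int) ≤ (petals.length : Int)) (i : Nat) :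
    ∀ (m a : Nat), i ≤ a → m = n - a → ∀ c : Int,
      ((PySem.List.pyRange (a : Int) (n : Int) 1).foldl (pvStepA petals (i : Int))
        (c, (pvWin petals i (a - i)).sum)).1 =
      c + ∑ j ∈ Finset.Ico a n, (if pvGood petals i (j - i + 1) then (1 : Int) else 0) := by
  have hnn : n ≤ petals.length := by exact_mod_cast hn
  intro m
  induction m with
  | zero =>
    intro a hia hm c
    rw [PySem.List.pyRange_one_eq_nil (Nat.cast_le.mpr (show n ≤ a by omega))]
    rw [Finset.Ico_eq_empty (by omega), Finset.sum_empty]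
    simp
  | succ k ih =>
    intro a hia hm c
    have han : a < n := by omega
    have hlen : a < petals.length := by omega
    rw [PySem.List.pyRange_one_cons (by exact_mod_cast han)]
    simp only [List.foldl_cons]
    have hlt : i + (a - i) < petals.length := by omega
    have hw := pvWin_succ petals i (a - i) hlt
    have hidx : petals[i + (a - i)]'hlt = petals[a]'hlen := by congr 1; omega
    rw [hidx] at hw
    have hget : PySem.List.pyGetD petals (a : Int) 0 = petals[a]'hlen := by
      rw [PySem.List.pyGetD_natCast, List.getD_eq_getElem petals 0 hlen]
    have htot : (pvWin petals i (a - i)).sum + PySem.List.pyGetD petals (a : Int) 0 =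
        (pvWin petals i (a - i + 1)).sum := by
      rw [hw, List.sum_append, hget]; simp
    have hnum : (a : Int) - (i : Int) + 1 = ((a - i + 1 : Nat) : Int) := by push_cast; omega
    have hslice : PySem.List.slice petals (some (i : Int)) (some ((a : Int) + 1)) =
        pvWin petals i (a - i + 1) := by
      rw [show (a : Int) + 1 = ((a + 1 : Nat) : Int) by push_cast; ring,
        PySem.List.slice_natCast]
      unfold pvWin
      rw [show a + 1 - i = a - i + 1 by omega]
    have hcondA : (PySem.Int.mod (pvWin petals i (a - i + 1)).sum ((a - i + 1 : Nat) : Int) = 0 ∧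
        PySem.Int.floordiv (pvWin petals i (a - i + 1)).sum ((a - i + 1 : Nat) : Int) ∈
          pvWin petals i (a - i + 1)) ↔ pvGood petals i (a - i + 1) = true := by
      unfold pvGood
      rw [decide_eq_true_iff]
    have hstep : pvStepA petals (i : Int) (c, (pvWin petals i (a - i)).sum) (a : Int) =
        (if pvGood petals i (a - i + 1) then c + 1 else c, (pvWin petals i (a - i + 1)).sum) := by
      simp only [pvStepA, htot, hnum, hslice]
      by_cases h1 : PySem.Int.mod (pvWin petals i (a - i + 1)).sum ((a - i + 1 : Nat) : Int) = 0
      · by_cases h2 : PySem.Int.floordiv (pvWin petals i (a - i + 1)).sum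
            ((a - i + 1 : Nat) : Int) ∈ pvWin petals i (a - i + 1)
        · rw [if_pos h1, if_pos h2, if_pos (hcondA.mp ⟨h1, h2⟩)]
        · rw [if_pos h1, if_neg h2,
            if_neg (fun hgg => h2 (hcondA.mpr hgg).2)]
      · rw [if_neg h1, if_neg (fun hgg => h1 (hcondA.mpr hgg).1)]
    rw [hstep]
    have hcast : (a : Int) + 1 = ((a + 1 : Nat) : Int) := by push_cast; ring
    rw [hcast]
    have hwin' : pvWin petals i (a - i + 1) = pvWin petals i (a + 1 - i) := by
      rw [show a + 1 - i = a - i + 1 by omega]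
    rw [hwin']
    rw [ih (a + 1) (by omega) (by omega)]
    rw [Finset.sum_eq_sum_Ico_succ_bot han]
    by_cases hg : pvGood petals i (a - i + 1)
    · simp [hg]; ring
    · simp [hg]

lemma pvA_eq (petals : List Int) (n : Nat) (hn : (n : Int) ≤ (petals.length : Int)) :
    count_average_flower_photos (n : Int) petals =
      ∑ i ∈ Finset.range n, ∑ L ∈ Finset.range (n + 1), pvF petals n i L := by
  unfold count_average_flower_photos
  rw [PySem.List.pyRange_zero_natCast, List.foldl_map]
  rw [PySem.List.foldl_congr_mem (List.range n)
    (fun c i => ((PySem.List.pyRange ((i : Nat) : Int) (n : Int) 1).foldl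
      (pvStepA petals ((i : Nat) : Int)) (c, 0)).1)
    (fun c i => c + ∑ j ∈ Finset.Ico i n,
      (if pvGood petals i (j - i + 1) then (1 : Int) else 0)) 0 ?_]
  · rw [PySem.List.foldl_add]
    rw [zero_add]
    have hsum : ((List.range n).map (fun i => ∑ j ∈ Finset.Ico i n,
        (if pvGood petals i (j - i + 1) then (1 : Int) else 0))).sum =
        ∑ i ∈ Finset.range n, ∑ j ∈ Finset.Ico i n,
          (if pvGood petals i (j - i + 1) then (1 : Int) else 0) := by
      rfl
    rw [hsum]
    exact Finset.sum_congr rfl (fun i _ => pvReindexA petals n i)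
  · intro c i hi
    have h0 : (pvWin petals i (i - i)).sum = 0 := by
      unfold pvWin; rw [Nat.sub_self]; simp
    have := pvA_inner petals n hn i (n - i) i le_rfl rfl c
    rw [h0] at this
    exact this

-- ===== B-side characterisation =====

-- Python's pfx[-1] on a nonempty list is its last element
lemma pvPyGetD_append_singleton (acc : List Int) (v : Int) :
    PySem.List.pyGetD (acc ++ [v]) (-1) 0 = v := by
  simp [PySem.List.pyGetD, PySem.List.pyGet?, PySem.List.pyIdx?]

-- the pfx list B builds is the list of partial sums
lemma pvPfx_eq (ys : List Int) :
    ∀ acc : List Int, acc ≠ [] →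
      List.foldl (fun acc x => acc ++ [PySem.List.pyGetD acc (-1) 0 + x]) acc ys =
        acc ++ (List.range ys.length).map
          (fun k => PySem.List.pyGetD acc (-1) 0 + (ys.take (k + 1)).sum) := by
  induction ys with
  | nil => intro acc _; simp
  | cons x t ih =>
    intro acc hacc
    simp only [List.foldl_cons]
    rw [ih (acc ++ [PySem.List.pyGetD acc (-1) 0 + x]) (by simp)]
    rw [pvPyGetD_append_singleton]
    rw [List.length_cons, List.range_succ_eq_map]
    simp only [List.map_cons, List.map_map, Function.comp_def, List.take_succ_cons,
      List.sum_cons, List.append_assoc]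
    congr 1
    simp only [List.take_zero, List.sum_nil, add_zero, List.cons_append, List.nil_append]
    congr 1
    apply List.map_congr_left
    intro k _
    ring

lemma pvB_inner (petals : List Int) (n : Nat) (hn : (n : Int) ≤ (petals.length : Int))
    (pfx : List Int)
    (hpre : ∀ m : Nat, m ≤ n → PySem.List.pyGetD pfx (m : Int) 0 = (petals.take m).sum)
    (L : Nat) (hL : 1 ≤ L) (hLn : L ≤ n) :
    ∀ (m a : Nat), a ≤ n - L + 1 → m = n - L + 1 - a → ∀ (c : Int) (d : PySem.Dict Int Int),
      (a + L ≤ n → ∀ x : Int, d.getD x 0 = ((pvWin petals a L).count x : Int)) →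
      ((PySem.List.pyRange (a : Int) ((n : Int) - (L : Int) + 1) 1).foldl
        (pvStepB (n : Int) petals pfx (L : Int)) (c, d)).1 =
      c + ∑ i ∈ Finset.Ico a (n - L + 1), (if pvGood petals i L then (1 : Int) else 0) := by
  have hnn : n ≤ petals.length := by exact_mod_cast hn
  have hbound : (n : Int) - (L : Int) + 1 = ((n - L + 1 : Nat) : Int) := by push_cast; omega
  intro m
  induction m with
  | zero =>
    intro a ha hm c d _
    rw [hbound, PySem.List.pyRange_one_eq_nil
      (Nat.cast_le.mpr (show n - L + 1 ≤ a by omega))]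
    rw [Finset.Ico_eq_empty (by omega), Finset.sum_empty]
    simp
  | succ k ih =>
    intro a ha hm c d hd
    have haL : a + L ≤ n := by omega
    have han : a < n - L + 1 := by omega
    rw [hbound, PySem.List.pyRange_one_cons (by exact_mod_cast han)]
    simp only [List.foldl_cons]
    have hd' := hd haL
    have htot : PySem.List.pyGetD pfx ((a : Int) + (L : Int)) 0 -
        PySem.List.pyGetD pfx (a : Int) 0 = (pvWin petals a L).sum := by
      rw [show (a : Int) + (L : Int) = ((a + L : Nat) : Int) by push_cast; ring]
      rw [hpre (a + L) haL, hpre a (by omega)]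
      exact pvWin_sum petals a L
    have hcond : (PySem.Int.mod (pvWin petals a L).sum (L : Int) = 0 ∧
        0 < d.getD (PySem.Int.floordiv (pvWin petals a L).sum (L : Int)) 0) ↔
        pvGood petals a L = true := by
      rw [hd']
      unfold pvGood
      rw [decide_eq_true_iff]
      constructor
      · rintro ⟨h1, h2⟩
        exact ⟨h1, List.count_pos_iff.mp (by exact_mod_cast h2)⟩
      · rintro ⟨h1, h2⟩
        exact ⟨h1, by exact_mod_cast List.count_pos_iff.mpr h2⟩
    have hstep1 : (pvStepB (n : Int) petals pfx (L : Int) (c, d) (a : Int)).1 =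
        if pvGood petals a L then c + 1 else c := by
      simp only [pvStepB, htot]
      by_cases hg : pvGood petals a L
      · rw [if_pos (hcond.mpr hg), if_pos hg]
      · rw [if_neg (fun h => hg (hcond.mp h)), if_neg hg]
    have hstep2 : a + 1 + L ≤ n → ∀ x : Int,
        (pvStepB (n : Int) petals pfx (L : Int) (c, d) (a : Int)).2.getD x 0 =
          ((pvWin petals (a + 1) L).count x : Int) := by
      intro hnext x
      have haLn : a + L < n := by omega
      have haLlen : a + L < petals.length := by omega
      have halen : a < petals.length := by omega
      obtain ⟨hsplit1, hsplit2⟩ := pvWin_shift petals a L hL haLlen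
      have hif : ((a : Int) + (L : Int) < (n : Int)) := by exact_mod_cast haLn
      have hp1 : PySem.List.pyGetD petals (a : Int) 0 = petals[a]'halen := by
        rw [PySem.List.pyGetD_natCast, List.getD_eq_getElem petals 0 halen]
      have hp2 : PySem.List.pyGetD petals ((a : Int) + (L : Int)) 0 = petals[a + L]'haLlen := by
        rw [show (a : Int) + (L : Int) = ((a + L : Nat) : Int) by push_cast; ring,
          PySem.List.pyGetD_natCast, List.getD_eq_getElem petals 0 haLlen]
      have e1 : ∀ y : Int, (pvWin petals a L).count y =
          (pvWin petals (a + 1) (L - 1)).count y + (if petals[a]'halen = y then 1 else 0) := by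
        intro y
        rw [hsplit1]
        simp [List.count_cons]
      have e2 : ∀ y : Int, (pvWin petals (a + 1) L).count y =
          (pvWin petals (a + 1) (L - 1)).count y + (if petals[a + L]'haLlen = y then 1 else 0) := by
        intro y
        rw [hsplit2]
        simp [List.count_append, List.count_cons]
      simp only [pvStepB, if_pos hif, hp1, hp2, PySem.Dict.getD_insert, hd']
      by_cases hx2 : x = petals[a + L]'haLlen
      · subst hx2
        by_cases h21 : petals[a + L]'haLlen = petals[a]'halen
        · rw [if_pos rfl, if_pos h21]
          have hA : (pvWin petals a L).count (petals[a]'halen) =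
              (pvWin petals (a + 1) (L - 1)).count (petals[a]'halen) + 1 := by
            rw [e1]; simp
          have hB : (pvWin petals (a + 1) L).count (petals[a + L]'haLlen) =
              (pvWin petals (a + 1) (L - 1)).count (petals[a + L]'haLlen) + 1 := by
            rw [e2]; simp
          have hC : (pvWin petals (a + 1) (L - 1)).count (petals[a + L]'haLlen) =
              (pvWin petals (a + 1) (L - 1)).count (petals[a]'halen) := by rw [h21]
          omega
        · rw [if_pos rfl, if_neg h21]
          have hA : (pvWin petals a L).count (petals[a + L]'haLlen) =
              (pvWin petals (a + 1) (L - 1)).count (petals[a + L]'haLlen) := by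
            rw [e1, if_neg (fun h => h21 h.symm), Nat.add_zero]
          have hB : (pvWin petals (a + 1) L).count (petals[a + L]'haLlen) =
              (pvWin petals (a + 1) (L - 1)).count (petals[a + L]'haLlen) + 1 := by
            rw [e2]; simp
          omega
      · rw [if_neg hx2]
        by_cases hx1 : x = petals[a]'halen
        · subst hx1
          rw [if_pos rfl]
          have hA : (pvWin petals a L).count (petals[a]'halen) =
              (pvWin petals (a + 1) (L - 1)).count (petals[a]'halen) + 1 := by
            rw [e1]; simp
          have hB : (pvWin petals (a + 1) L).count (petals[a]'halen) =
              (pvWin petals (a + 1) (L - 1)).count (petals[a]'halen) := by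
            rw [e2, if_neg (fun h => hx2 h.symm), Nat.add_zero]
          omega
        · rw [if_neg hx1]
          have hA : (pvWin petals a L).count x =
              (pvWin petals (a + 1) (L - 1)).count x := by
            rw [e1, if_neg (fun h => hx1 h.symm), Nat.add_zero]
          have hB : (pvWin petals (a + 1) L).count x =
              (pvWin petals (a + 1) (L - 1)).count x := by
            rw [e2, if_neg (fun h => hx2 h.symm), Nat.add_zero]
          omega
    have hpair : pvStepB (n : Int) petals pfx (L : Int) (c, d) (a : Int) =
        ((if pvGood petals a L then c + 1 else c),
         (pvStepB (n : Int) petals pfx (L : Int) (c, d) (a : Int)).2) := by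
      rw [← hstep1]
    rw [hpair]
    have hcast : (a : Int) + 1 = ((a + 1 : Nat) : Int) := by push_cast; ring
    rw [hcast, ← hbound]
    rw [ih (a + 1) (by omega) (by omega) _ _ hstep2]
    rw [Finset.sum_eq_sum_Ico_succ_bot (by omega : a < n - L + 1)]
    by_cases hg : pvGood petals a L
    · simp [hg]; ring
    · simp [hg]

lemma pvPyRange_one_natCast (n : Nat) :
    PySem.List.pyRange 1 ((n : Int) + 1) 1 = (List.range n).map (fun k : Nat => ((k : Int) + 1)) := by
  induction n with
  | zero => simp [PySem.List.pyRange_one_eq_nil]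
  | succ m ih =>
    rw [show ((m + 1 : Nat) : Int) + 1 = ((m : Int) + 1) + 1 by push_cast; ring]
    rw [PySem.List.pyRange_one_succ_right (by omega)]
    rw [List.range_succ, List.map_append, ih]
    simp

lemma pvB_eq (petals : List Int) (n : Nat) (hn : (n : Int) ≤ (petals.length : Int)) :
    count_average_flower_photos_alt (n : Int) petals =
      ∑ L ∈ Finset.range (n + 1), ∑ i ∈ Finset.range n, pvF petals n i L := by
  have hnn : n ≤ petals.length := by exact_mod_cast hn
  unfold count_average_flower_photos_alt
  simp only [PySem.List.slice_to_natCast]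
  have hlen : (petals.take n).length = n := by simp [hnn]
  have hpre : ∀ m : Nat, m ≤ n →
      PySem.List.pyGetD (List.foldl (fun acc x => acc ++ [PySem.List.pyGetD acc (-1) 0 + x])
        [0] (petals.take n)) (m : Int) 0 = (petals.take m).sum := by
    intro m hm
    rw [pvPfx_eq (petals.take n) [0] (by simp), hlen]
    have h1 : PySem.List.pyGetD ([] ++ [(0 : Int)]) (-1) 0 = 0 := pvPyGetD_append_singleton [] 0
    simp only [List.nil_append] at h1
    rw [h1, PySem.List.pyGetD_natCast]
    match m, hm with
    | 0, _ => simp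
    | (k + 1), hm =>
      simp only [List.singleton_append, List.getD_cons_succ]
      rw [PySem.List.getD_map_range (fun j => 0 + ((petals.take n).take (j + 1)).sum) n k 0
        (by omega)]
      rw [List.take_take, zero_add, show min (k + 1) n = k + 1 from by omega]
  rw [pvPyRange_one_natCast, List.foldl_map]
  rw [PySem.List.foldl_congr_mem (List.range n) _
    (fun count k => count + ∑ i ∈ Finset.Ico 0 (n - (k + 1) + 1),
      (if pvGood petals i (k + 1) then (1 : Int) else 0)) 0 ?_]
  · rw [PySem.List.foldl_add, zero_add]
    have hsum : ((List.range n).map (fun k => ∑ i ∈ Finset.Ico 0 (n - (k + 1) + 1),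
        (if pvGood petals i (k + 1) then (1 : Int) else 0))).sum =
        ∑ k ∈ Finset.range n, ∑ i ∈ Finset.Ico 0 (n - (k + 1) + 1),
          (if pvGood petals i (k + 1) then (1 : Int) else 0) := rfl
    rw [hsum, Finset.sum_range_succ']
    have hzero : (∑ i ∈ Finset.range n, pvF petals n i 0) = 0 := by
      apply Finset.sum_eq_zero
      intro i _
      simp [pvF]
    rw [hzero, add_zero]
    apply Finset.sum_congr rfl
    intro k hk
    simp only [Finset.mem_range] at hk
    rw [← Finset.range_eq_Ico]
    rw [← Finset.sum_subset
      (show Finset.range (n - (k + 1) + 1) ⊆ Finset.range n by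
        intro x hx; simp only [Finset.mem_range] at *; omega)
      (by
        intro i hmem hi
        simp only [Finset.mem_range, not_lt] at hmem hi
        unfold pvF
        rw [if_neg (by omega)])]
    apply Finset.sum_congr rfl
    intro i hi
    simp only [Finset.mem_range] at hi
    unfold pvF
    rw [if_pos (show 1 ≤ k + 1 ∧ i + (k + 1) ≤ n by omega)]
  · intro c k hk
    simp only [List.mem_range] at hk
    have hcast1 : (k : Int) + 1 = ((k + 1 : Nat) : Int) := by push_cast; ring
    have hcnt : ∀ x : Int,
        (List.foldl (fun d x => d.insert x (d.getD x 0 + 1)) PySem.Dict.empty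
          (PySem.List.slice petals none (some ((k : Int) + 1)))).getD x 0 =
          ((pvWin petals 0 (k + 1)).count x : Int) := by
      intro x
      rw [hcast1, PySem.List.slice_to_natCast]
      rw [PySem.Dict.getD_foldl_insert_add_one]
      rw [PySem.Dict.getD_empty]
      unfold pvWin
      simp
    have := pvB_inner petals n hn _ hpre (k + 1) (by omega) (by omega)
      (n - (k + 1) + 1 - 0) 0 (by omega) rfl c _ (fun _ => hcnt)
    rw [show ((0 : Nat) : Int) = (0 : Int) by simp, hcast1] at this
    exact this

-- ===== VERDICT (by name: the statement is the Claim_ definition above) =====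
theorem count_average_flower_photos_spec : Claim_equal_count_average_flower_photos := by
  intro N petals _ hPre
  unfold Spec_count_average_flower_photos
  by_cases hN : N ≤ 0
  · unfold count_average_flower_photos count_average_flower_photos_alt
    rw [PySem.List.pyRange_one_eq_nil (by omega), PySem.List.pyRange_one_eq_nil (by omega)]
    rfl
  · obtain ⟨n, rfl⟩ : ∃ n : Nat, N = (n : Int) := ⟨N.toNat, by omega⟩
    rw [pvA_eq petals n hPre, pvB_eq petals n hPre, Finset.sum_comm]
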